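-- pv_equiv track=rewrite | github.com/jrreimer/Uncertainty-quantification-for-ecological-models-with-random-parameters | np_algae_model.py | plot_labels
-- ===== SOURCE A (Python) =====
-- def plot_labels(variable_interactions, variable_texts):
--     """
--     Computes a list of labels for plotting based on variable interactions and given variable texts.
--     """
--
--     labels = []
--     for q in range(len(variable_interactions)):
--         temp = list(variable_interactions[q])
--         label_str = "$I = \\{$"
--         nonein = True
--         if 0 in temp:
--             label_str += variable_texts[0]
--             #label_str += "$B$"
--             nonein = False
--
--         if 1 in temp:
--             if nonein:
--                 label_str += variable_texts[1]
--                 #label_str += "$N(\\tau_B)$"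
--                 nonein = False
--             else:
--                 label_str += ", " + variable_texts[1]
--                 #label_str += ", $N(\\tau_B)$"
--
--         if 2 in temp:
--             if nonein:
--                 label_str += variable_texts[2]
--                 #label_str += "$P(\\tau_B)$"
--                 nonein = False
--             else:
--                 label_str += ", " + variable_texts[2]
--                 #label_str += ", $P(\\tau_B)$"
--
--         label_str += "$\\}$"
--         labels.append(label_str)
--
--     return labels
-- ===== SOURCE B (Python) =====
-- def plot_labels(variable_interactions, variable_texts):
--     # Memoize: only 8 distinct membership keys exist, so build each label once
--     # and answer repeats by dictionary lookup.
--     cache = {}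
--     labels = []
--     for s in variable_interactions:
--         key = (0 in s, 1 in s, 2 in s)
--         if key not in cache:
--             parts = [t for flag, t in zip(key, variable_texts) if flag]
--             cache[key] = "$I = \\{$" + ", ".join(parts) + "$\\}$"
--         labels.append(cache[key])
--     return labels
-- ===== Notes on version B (the rewrite author's own statement) =====
-- stated objective: alternative
-- what changed: B encodes each interaction as a 3-bool membership key and memoizes the finished label per key in a dictionary (at most 8 distinct labels ever built, answering repeats by lookup), instead of A's per-element nonein flag with per-branch comma prepending.
import Mathlib
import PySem

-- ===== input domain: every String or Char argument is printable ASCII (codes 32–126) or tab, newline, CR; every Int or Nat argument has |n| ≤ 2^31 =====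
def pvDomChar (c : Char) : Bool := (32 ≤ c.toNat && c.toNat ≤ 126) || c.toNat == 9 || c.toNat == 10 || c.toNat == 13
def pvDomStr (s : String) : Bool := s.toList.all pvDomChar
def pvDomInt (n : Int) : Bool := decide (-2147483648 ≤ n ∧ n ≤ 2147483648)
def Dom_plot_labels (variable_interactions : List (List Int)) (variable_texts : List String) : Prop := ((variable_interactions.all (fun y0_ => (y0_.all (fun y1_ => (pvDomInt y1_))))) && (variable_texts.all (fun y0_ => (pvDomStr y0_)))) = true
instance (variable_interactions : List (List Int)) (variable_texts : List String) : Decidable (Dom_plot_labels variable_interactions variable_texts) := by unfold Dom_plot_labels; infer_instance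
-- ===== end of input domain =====

-- B memoizes one finished label per 3-bool membership key in a dictionary (at most 8
-- ever built) instead of A's per-element nonein flag with per-branch comma prepending
-- (alternative decomposition, same asymptotic cost).

-- ===== PORT A =====
-- one iteration of A's loop body: the nonein flag threaded through the three if-branches
def plotLabelsBody (variable_texts : List String) (temp : List Int) : String :=
  let label_str := "$I = \\{$"
  let st1 : String × Bool :=
    if temp.contains 0 then (label_str ++ PySem.List.pyGetD variable_texts 0 "", false)
    else (label_str, true)
  let st2 : String × Bool :=
    if temp.contains 1 then
      if st1.2 then (st1.1 ++ PySem.List.pyGetD variable_texts 1 "", false)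
      else (st1.1 ++ ", " ++ PySem.List.pyGetD variable_texts 1 "", st1.2)
    else st1
  let st3 : String × Bool :=
    if temp.contains 2 then
      if st2.2 then (st2.1 ++ PySem.List.pyGetD variable_texts 2 "", false)
      else (st2.1 ++ ", " ++ PySem.List.pyGetD variable_texts 2 "", st2.2)
    else st2
  st3.1 ++ "$\\}$"

-- indexing uses pyGetD with default "": Pre_ guarantees every index actually read is in range
def plot_labels (variable_interactions : List (List Int)) (variable_texts : List String) : List String :=
  (PySem.List.pyRange 0 (variable_interactions.length : Int) 1).foldl
    (fun labels q =>
      labels ++ [plotLabelsBody variable_texts (PySem.List.pyGetD variable_interactions q [])])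
    []

-- ===== PORT B =====
-- the label built on a cache miss: zip the key flags with the texts, keep flagged texts, join
def mkLabel (key : Bool × Bool × Bool) (variable_texts : List String) : String :=
  let parts := ((([key.1, key.2.1, key.2.2]).zip variable_texts).filter (fun p => p.1)).map (fun p => p.2)
  "$I = \\{$" ++ PySem.Str.join ", " parts ++ "$\\}$"

-- cache[key] after the miss-branch is always present; getD "" is exact there
def plot_labels_alt (variable_interactions : List (List Int)) (variable_texts : List String) : List String :=
  (variable_interactions.foldl
    (fun (st : PySem.Dict (Bool × Bool × Bool) String × List String) s =>
      let key := (s.contains 0, s.contains 1, s.contains 2)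
      let cache := if (st.1.get? key).isNone then st.1.insert key (mkLabel key variable_texts) else st.1
      (cache, st.2 ++ [cache.getD key ""]))
    (PySem.Dict.empty, [])).2

-- ===== PRECONDITION & SPEC =====
-- Pre_ excludes exactly the inputs where the Python A raises IndexError (an interaction
-- mentions index i ∈ {0,1,2} but variable_texts has no entry i).
def Pre_plot_labels (variable_interactions : List (List Int)) (variable_texts : List String) : Prop :=
  ∀ l ∈ variable_interactions,
    ((0 : Int) ∈ l → 1 ≤ variable_texts.length) ∧
    ((1 : Int) ∈ l → 2 ≤ variable_texts.length) ∧
    ((2 : Int) ∈ l → 3 ≤ variable_texts.length)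
instance (variable_interactions : List (List Int)) (variable_texts : List String) : Decidable (Pre_plot_labels variable_interactions variable_texts) := by unfold Pre_plot_labels; infer_instance

def pvWitness_plot_labels : List (List Int) × List String :=
  ([[0, 2], [1], [], [0, 2]], ["$B$", "$N$", "$P$"])

def Spec_plot_labels (variable_interactions : List (List Int)) (variable_texts : List String) (out : List String) : Prop := out = plot_labels_alt variable_interactions variable_texts
instance (variable_interactions : List (List Int)) (variable_texts : List String) (out : List String) : Decidable (Spec_plot_labels variable_interactions variable_texts out) := by unfold Spec_plot_labels; infer_instance

-- ===== CLAIM (what is proved, stated in full; the proofs are below) =====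
def Claim_equal_plot_labels : Prop := ∀ (variable_interactions : List (List Int)) (variable_texts : List String), Dom_plot_labels variable_interactions variable_texts → Pre_plot_labels variable_interactions variable_texts → Spec_plot_labels variable_interactions variable_texts (plot_labels variable_interactions variable_texts)

-- ===== LEMMAS AND PROOFS =====

-- per-element agreement: A's flag-threaded body equals B's zip-filter-join label,
-- given that every index the element actually mentions is in range
theorem body_eq_mkLabel (vt : List String) (temp : List Int)
    (h0 : (0 : Int) ∈ temp → 1 ≤ vt.length)
    (h1 : (1 : Int) ∈ temp → 2 ≤ vt.length)
    (h2 : (2 : Int) ∈ temp → 3 ≤ vt.length) :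
    plotLabelsBody vt temp = mkLabel (temp.contains 0, temp.contains 1, temp.contains 2) vt := by
  unfold plotLabelsBody mkLabel
  obtain _ | ⟨a, _ | ⟨b, _ | ⟨c, rest⟩⟩⟩ := vt <;>
    by_cases m0 : (0 : Int) ∈ temp <;> by_cases m1 : (1 : Int) ∈ temp <;>
      by_cases m2 : (2 : Int) ∈ temp <;>
        first
        | simpa using h2 m2
        | simpa using h1 m1
        | simpa using h0 m0
        | (simp only [List.contains_eq_mem, m0, m1, m2, decide_true, decide_false, if_true]
           apply String.toList_injective
           simp [PySem.Str.toList_join, PySem.Chars.join_cons_cons,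
             PySem.Chars.join_singleton, PySem.Chars.join_nil, List.zip, PySem.List.pyIdx?,
             PySem.List.pyGetD, PySem.List.pyGet?]
           all_goals (split_ifs <;> (try simp_all) <;> (try omega)))

theorem plot_labels_eq_map (vi : List (List Int)) (vt : List String) :
    plot_labels vi vt = vi.map (plotLabelsBody vt) := by
  unfold plot_labels
  rw [PySem.List.foldl_pyRange_zero_pyGetD' vi []
      (fun labels temp => labels ++ [plotLabelsBody vt temp]) []]
  exact PySem.List.foldl_append_singleton_eq_map ..

-- the memoizing loop of B: as long as every cached value is the key's mkLabel,
-- the emitted labels are exactly the per-element mkLabel values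
theorem alt_loop (vt : List String) (vi : List (List Int))
    (cache : PySem.Dict (Bool × Bool × Bool) String) (labels : List String)
    (hc : ∀ k v, cache.get? k = some v → v = mkLabel k vt) :
    (vi.foldl
      (fun (st : PySem.Dict (Bool × Bool × Bool) String × List String) s =>
        let key := (s.contains 0, s.contains 1, s.contains 2)
        let cache := if (st.1.get? key).isNone then st.1.insert key (mkLabel key vt) else st.1
        (cache, st.2 ++ [cache.getD key ""]))
      (cache, labels)).2 =
      labels ++ vi.map (fun s => mkLabel (s.contains 0, s.contains 1, s.contains 2) vt) := by
  induction vi generalizing cache labels with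
  | nil => simp
  | cons s rest ih =>
    cases hq : cache.get? (s.contains 0, s.contains 1, s.contains 2) with
    | none =>
      have hmiss : (cache.get? (s.contains 0, s.contains 1, s.contains 2)).isNone = true := by
        rw [hq]; rfl
      simp only [List.foldl_cons, List.map_cons, if_pos hmiss]
      rw [ih _ _ (fun k v hv => by
        rw [PySem.Dict.get?_insert] at hv
        split at hv
        · next h => subst h; exact (Option.some_inj.mp hv).symm
        · exact hc k v hv)]
      rw [PySem.Dict.getD_insert_self]
      simp
    | some v =>
      have hmiss : ¬ (cache.get? (s.contains 0, s.contains 1, s.contains 2)).isNone = true := by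
        rw [hq]; simp
      simp only [List.foldl_cons, List.map_cons, if_neg hmiss]
      rw [ih _ _ hc, PySem.Dict.getD_eq_get?_getD, hq, hc _ v hq]
      simp

-- ===== VERDICT (by name: the statement is the Claim_ definition above) =====
theorem plot_labels_spec : Claim_equal_plot_labels := by
  intro vi vt _ hpre
  unfold Spec_plot_labels plot_labels_alt
  rw [alt_loop vt vi PySem.Dict.empty []
      (fun k v hv => by simp [PySem.Dict.get?_empty] at hv)]
  rw [plot_labels_eq_map]
  simp only [List.nil_append]
  exact List.map_congr_left fun l hl =>
    body_eq_mkLabel vt l (hpre l hl).1 (hpre l hl).2.1 (hpre l hl).2.2
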